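-- pv_equiv track=rewrite | github.com/escribircomoeldiablo/booksmachine | src/chunker_structural.py | _find_backward_split
-- ===== SOURCE A (Python) =====
-- SENTENCE_MARKERS = (". ", "? ", "! ")
--
-- def _find_backward_split(text: str, start: int, target_end: int, split_window: int) -> int:
--     search_start = max(start, target_end - split_window)
--     window = text[search_start:target_end]
--     if not window:
--         return target_end
--
--     idx = window.rfind("\n\n")
--     if idx >= 0:
--         return search_start + idx + 2
--
--     best_sentence = -1
--     for marker in SENTENCE_MARKERS:
--         local = window.rfind(marker)
--         if local > best_sentence:
--             best_sentence = local
--     if best_sentence >= 0: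
--         return search_start + best_sentence + 2
--
--     space = window.rfind(" ")
--     if space >= 0:
--         return search_start + space + 1
--     return target_end
-- ===== SOURCE B (Python) =====
-- def _find_backward_split(text: str, start: int, target_end: int, split_window: int) -> int:
--     # Single backward pass over the window instead of four separate rfind scans:
--     # return at the rightmost paragraph break immediately; otherwise remember the
--     # first (i.e. rightmost) sentence-marker and space seen, apply priority at the end.
--     search_start = max(start, target_end - split_window)
--     window = text[search_start:target_end]
--     if not window:
--         return target_end
--     sentence = -1
--     space = -1
--     for i in range(len(window) - 1, -1, -1):
--         c = window[i]
--         nxt = window[i + 1] if i + 1 < len(window) else ""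
--         if c == "\n" and nxt == "\n":
--             return search_start + i + 2
--         if sentence < 0 and nxt == " " and c in ".?!":
--             sentence = i
--         if space < 0 and c == " ":
--             space = i
--     if sentence >= 0:
--         return search_start + sentence + 2
--     if space >= 0:
--         return search_start + space + 1
--     return target_end
-- ===== Notes on version B (the rewrite author's own statement) =====
-- stated objective: alternative
-- what changed: Replaces A's four separate rfind passes over the window (paragraph, three sentence markers, space) by a single backward scan that returns immediately at the rightmost paragraph break and remembers the rightmost sentence marker and space for the final priority decision.
import Mathlib
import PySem

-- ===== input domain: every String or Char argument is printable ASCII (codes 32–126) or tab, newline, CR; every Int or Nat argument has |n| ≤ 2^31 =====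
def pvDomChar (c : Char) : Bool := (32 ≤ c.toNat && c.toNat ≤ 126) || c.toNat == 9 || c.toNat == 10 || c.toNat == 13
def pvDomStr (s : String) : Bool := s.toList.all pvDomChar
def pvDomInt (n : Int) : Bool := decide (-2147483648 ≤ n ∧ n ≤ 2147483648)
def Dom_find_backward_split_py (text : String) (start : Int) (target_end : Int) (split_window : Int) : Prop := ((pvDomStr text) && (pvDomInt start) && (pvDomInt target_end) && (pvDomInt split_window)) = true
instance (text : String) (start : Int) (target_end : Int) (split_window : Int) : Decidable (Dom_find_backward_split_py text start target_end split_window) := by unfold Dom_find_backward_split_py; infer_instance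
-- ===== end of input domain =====

-- B replaces A's four separate rfind passes over the window by ONE backward scan that
-- returns at the rightmost paragraph break and remembers the rightmost sentence marker
-- and space seen (objective: alternative single-pass decomposition; same result proved below).

-- ===== PORT A =====
-- module constant SENTENCE_MARKERS
def pvSentenceMarkers : List String := [". ", "? ", "! "]

def find_backward_split_py (text : String) (start : Int) (target_end : Int) (split_window : Int) : Int :=
  let search_start := max start (target_end - split_window)
  let window := PySem.Str.slice text (some search_start) (some target_end)
  if window = "" then target_end
  else
    let idx := PySem.Str.rfind window "\n\n"
    if idx ≥ 0 then search_start + idx + 2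
    else
      let best_sentence := pvSentenceMarkers.foldl (fun best marker =>
        let loc := PySem.Str.rfind window marker
        if loc > best then loc else best) (-1)
      if best_sentence ≥ 0 then search_start + best_sentence + 2
      else
        let space := PySem.Str.rfind window " "
        if space ≥ 0 then search_start + space + 1 else target_end

-- ===== PORT B =====
-- the backward index loop of Source B: i runs from w.length - 1 down to 0 (the Nat argument is i + 1)
def pvScanBack (w : List Char) (search_start target_end : Int) : Nat → Int → Int → Int
  | 0, sentence, space =>
      if sentence ≥ 0 then search_start + sentence + 2
      else if space ≥ 0 then search_start + space + 1
      else target_end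
  | i+1, sentence, space =>
      let c := w[i]?
      let nxt := w[i+1]?
      if c = some '\n' ∧ nxt = some '\n' then search_start + (i : Int) + 2
      else
        pvScanBack w search_start target_end i
          (if sentence < 0 ∧ nxt = some ' ' ∧ (c = some '.' ∨ c = some '?' ∨ c = some '!') then (i : Int) else sentence)
          (if space < 0 ∧ c = some ' ' then (i : Int) else space)

def find_backward_split_py_alt (text : String) (start : Int) (target_end : Int) (split_window : Int) : Int :=
  let search_start := max start (target_end - split_window)
  let window := PySem.Str.slice text (some search_start) (some target_end)
  if window = "" then target_end
  else pvScanBack window.toList search_start target_end window.toList.length (-1) (-1)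

-- ===== PRECONDITION & SPEC =====
def Spec_find_backward_split_py (text : String) (start : Int) (target_end : Int) (split_window : Int) (out : Int) : Prop := out = find_backward_split_py_alt text start target_end split_window
instance (text : String) (start : Int) (target_end : Int) (split_window : Int) (out : Int) : Decidable (Spec_find_backward_split_py text start target_end split_window out) := by unfold Spec_find_backward_split_py; infer_instance

-- ===== CLAIM (what is proved, stated in full; the proofs are below) =====
def Claim_equal_find_backward_split_py : Prop := ∀ (text : String) (start : Int) (target_end : Int) (split_window : Int), Dom_find_backward_split_py text start target_end split_window → Spec_find_backward_split_py text start target_end split_window (find_backward_split_py text start target_end split_window)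

-- ===== LEMMAS AND PROOFS =====
def pvLast (p : Nat → Bool) : Nat → Int
  | 0 => -1
  | i+1 => if p i then (i : Int) else pvLast p i

def pvPairP (w : List Char) (a b : Char) (i : Nat) : Bool := w[i]? == some a && w[i+1]? == some b
def pvSentP (w : List Char) (i : Nat) : Bool :=
  w[i+1]? == some ' ' && (w[i]? == some '.' || w[i]? == some '?' || w[i]? == some '!')
def pvSpaceP (w : List Char) (i : Nat) : Bool := w[i]? == some ' '

theorem pvLast_ge (p : Nat → Bool) (i : Nat) : -1 ≤ pvLast p i := by
  induction i with
  | zero => simp [pvLast]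
  | succ i ih => simp only [pvLast]; split <;> omega

theorem pvLast_lt (p : Nat → Bool) (i : Nat) : pvLast p i < (i : Int) := by
  induction i with
  | zero => simp [pvLast]
  | succ i ih => simp only [pvLast]; split <;> omega

theorem pvLast_or (p q : Nat → Bool) (i : Nat) :
    pvLast (fun j => p j || q j) i = max (pvLast p i) (pvLast q i) := by
  induction i with
  | zero => simp [pvLast]
  | succ i ih =>
      have hp := pvLast_lt p i
      have hq := pvLast_lt q i
      simp only [pvLast, ih, Bool.or_eq_true]
      by_cases h1 : p i = true <;> by_cases h2 : q i = true <;> simp [h1, h2] <;> omega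

theorem pvIsPrefixOf_pair (l : List Char) (a b : Char) :
    [a, b].isPrefixOf l = true ↔ (l[0]? = some a ∧ l[1]? = some b) := by
  match l with
  | [] => simp [List.isPrefixOf]
  | [x] => simp [List.isPrefixOf]
  | x :: y :: t =>
      simp [List.isPrefixOf]
      exact ⟨fun h => ⟨h.1.symm, h.2.symm⟩, fun h => ⟨h.1.symm, h.2.symm⟩⟩

theorem pvIsPrefixOf_single (l : List Char) (a : Char) :
    [a].isPrefixOf l = true ↔ l[0]? = some a := by
  match l with
  | [] => simp [List.isPrefixOf]
  | x :: t =>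
      simp [List.isPrefixOf]
      exact eq_comm

theorem pvRfindGo_eq (w sub : List Char) (k : Nat) :
    PySem.Chars.rfind.go w sub k = pvLast (fun j => sub.isPrefixOf (w.drop j)) (k + 1) := by
  induction k with
  | zero => simp [PySem.Chars.rfind.go, pvLast]
  | succ k ih => simp only [PySem.Chars.rfind.go, pvLast, ih]

theorem pvRfind_pair (w : List Char) (a b : Char) :
    PySem.Chars.rfind w [a, b] = pvLast (pvPairP w a b) w.length := by
  unfold PySem.Chars.rfind
  rw [pvRfindGo_eq]
  have hfun : (fun j => [a, b].isPrefixOf (w.drop j)) = pvPairP w a b := by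
    funext j
    have h0 : (w.drop j)[0]? = w[j]? := by simp [List.getElem?_drop]
    have h1 : (w.drop j)[1]? = w[j+1]? := by rw [List.getElem?_drop]
    apply Bool.eq_iff_iff.mpr
    rw [pvIsPrefixOf_pair, h0, h1]
    simp [pvPairP]
  rw [hfun]
  have hfalse : pvPairP w a b w.length = false := by simp [pvPairP]
  simp [pvLast, hfalse]

theorem pvRfind_single (w : List Char) (a : Char) :
    PySem.Chars.rfind w [a] = pvLast (fun j => w[j]? == some a) w.length := by
  unfold PySem.Chars.rfind
  rw [pvRfindGo_eq]
  have hfun : (fun j => [a].isPrefixOf (w.drop j)) = (fun j => w[j]? == some a) := by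
    funext j
    have h0 : (w.drop j)[0]? = w[j]? := by simp [List.getElem?_drop]
    apply Bool.eq_iff_iff.mpr
    rw [pvIsPrefixOf_single, h0]
    simp
  rw [hfun]
  simp [pvLast]

theorem pvSentP_eq (w : List Char) :
    pvSentP w = (fun j => pvPairP w '.' ' ' j || (pvPairP w '?' ' ' j || pvPairP w '!' ' ' j)) := by
  funext j
  simp only [pvSentP, pvPairP]
  cases h1 : (w[j+1]? == some ' ') <;> cases h2 : (w[j]? == some '.') <;>
    cases h3 : (w[j]? == some '?') <;> cases h4 : (w[j]? == some '!') <;> simp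

theorem pvScanBack_eq (w : List Char) (ss te : Int) (i : Nat) :
    ∀ sentence space, pvScanBack w ss te i sentence space =
      if pvLast (pvPairP w '\n' '\n') i ≥ 0 then ss + pvLast (pvPairP w '\n' '\n') i + 2
      else if sentence ≥ 0 then ss + sentence + 2
      else if pvLast (pvSentP w) i ≥ 0 then ss + pvLast (pvSentP w) i + 2
      else if space ≥ 0 then ss + space + 1
      else if pvLast (pvSpaceP w) i ≥ 0 then ss + pvLast (pvSpaceP w) i + 1
      else te := by
  induction i with
  | zero =>
      intro sentence space
      simp [pvScanBack, pvLast]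
  | succ i ih =>
      intro sentence space
      have hLp : pvLast (pvPairP w '\n' '\n') (i+1)
          = if (w[i]? = some '\n' ∧ w[i+1]? = some '\n') then (i:Int) else pvLast (pvPairP w '\n' '\n') i := by
        by_cases h : (w[i]? = some '\n' ∧ w[i+1]? = some '\n')
        · have hb : pvPairP w '\n' '\n' i = true := by simp [pvPairP, h.1, h.2]
          simp [pvLast, hb, h]
        · have hb : pvPairP w '\n' '\n' i = false := by
            simp only [pvPairP, Bool.and_eq_true, beq_iff_eq, Bool.eq_false_iff, ne_eq]
            exact fun hc => h ⟨hc.1, hc.2⟩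
          simp [pvLast, hb, h]
      have hLs : pvLast (pvSentP w) (i+1)
          = if (w[i+1]? = some ' ' ∧ (w[i]? = some '.' ∨ w[i]? = some '?' ∨ w[i]? = some '!')) then (i:Int) else pvLast (pvSentP w) i := by
        by_cases h : (w[i+1]? = some ' ' ∧ (w[i]? = some '.' ∨ w[i]? = some '?' ∨ w[i]? = some '!'))
        · have hb : pvSentP w i = true := by
            simp only [pvSentP, Bool.and_eq_true, Bool.or_eq_true, beq_iff_eq]
            tauto
          simp [pvLast, hb, h]
        · have hb : pvSentP w i = false := by
            simp only [pvSentP, Bool.eq_false_iff, ne_eq, Bool.and_eq_true, Bool.or_eq_true, beq_iff_eq]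
            tauto
          simp [pvLast, hb, h]
      have hLsp : pvLast (pvSpaceP w) (i+1)
          = if (w[i]? = some ' ') then (i:Int) else pvLast (pvSpaceP w) i := by
        by_cases h : (w[i]? = some ' ')
        · have hb : pvSpaceP w i = true := by simp [pvSpaceP, h]
          simp [pvLast, hb, h]
        · have hb : pvSpaceP w i = false := by simp [pvSpaceP, h]
          simp [pvLast, hb, h]
      rw [hLp, hLs, hLsp]
      by_cases hp : (w[i]? = some '\n' ∧ w[i+1]? = some '\n')
      · simp only [pvScanBack, if_pos hp]
        split_ifs <;> omega
      · have hlt1 := pvLast_lt (pvPairP w '\n' '\n') i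
        have hlt2 := pvLast_lt (pvSentP w) i
        have hlt3 := pvLast_lt (pvSpaceP w) i
        simp only [pvScanBack, if_neg hp, ih]
        by_cases hP : (w[i+1]? = some ' ' ∧ (w[i]? = some '.' ∨ w[i]? = some '?' ∨ w[i]? = some '!')) <;>
          by_cases hQ : (w[i]? = some ' ') <;>
            simp [hP, hQ] <;> split_ifs <;> omega

theorem pvFold_max (r1 r2 r3 : Int) (h1 : -1 ≤ r1) (h2 : -1 ≤ r2) (h3 : -1 ≤ r3) :
    (if r3 > (if r2 > (if r1 > -1 then r1 else -1) then r2 else (if r1 > -1 then r1 else -1))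
       then r3 else (if r2 > (if r1 > -1 then r1 else -1) then r2 else (if r1 > -1 then r1 else -1)))
    = max r1 (max r2 r3) := by
  split_ifs <;> omega

theorem pvBody (window : String) (ss te : Int) :
    (if window = "" then te
     else
       let idx := PySem.Str.rfind window "\n\n"
       if idx ≥ 0 then ss + idx + 2
       else
         let best_sentence := pvSentenceMarkers.foldl (fun best marker =>
           let loc := PySem.Str.rfind window marker
           if loc > best then loc else best) (-1)
         if best_sentence ≥ 0 then ss + best_sentence + 2
         else
           let space := PySem.Str.rfind window " "
           if space ≥ 0 then ss + space + 1 else te)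
    = (if window = "" then te
       else pvScanBack window.toList ss te window.toList.length (-1) (-1)) := by
  by_cases hempty : window = ""
  · rw [if_pos hempty, if_pos hempty]
  · rw [if_neg hempty, if_neg hempty, pvScanBack_eq]
    have hnl : PySem.Str.rfind window "\n\n" = pvLast (pvPairP window.toList '\n' '\n') window.toList.length := by
      rw [show PySem.Str.rfind window "\n\n" = PySem.Chars.rfind window.toList ['\n','\n'] from rfl]
      exact pvRfind_pair _ _ _
    have hdot : PySem.Str.rfind window ". " = pvLast (pvPairP window.toList '.' ' ') window.toList.length := by
      rw [show PySem.Str.rfind window ". " = PySem.Chars.rfind window.toList ['.',' '] from rfl]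
      exact pvRfind_pair _ _ _
    have hq : PySem.Str.rfind window "? " = pvLast (pvPairP window.toList '?' ' ') window.toList.length := by
      rw [show PySem.Str.rfind window "? " = PySem.Chars.rfind window.toList ['?',' '] from rfl]
      exact pvRfind_pair _ _ _
    have hex : PySem.Str.rfind window "! " = pvLast (pvPairP window.toList '!' ' ') window.toList.length := by
      rw [show PySem.Str.rfind window "! " = PySem.Chars.rfind window.toList ['!',' '] from rfl]
      exact pvRfind_pair _ _ _
    have hsp : PySem.Str.rfind window " " = pvLast (pvSpaceP window.toList) window.toList.length := by
      rw [show PySem.Str.rfind window " " = PySem.Chars.rfind window.toList [' '] from rfl]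
      exact pvRfind_single _ _
    have hsent : pvLast (pvSentP window.toList) window.toList.length
        = max (pvLast (pvPairP window.toList '.' ' ') window.toList.length)
            (max (pvLast (pvPairP window.toList '?' ' ') window.toList.length)
              (pvLast (pvPairP window.toList '!' ' ') window.toList.length)) := by
      rw [pvSentP_eq, pvLast_or]
      congr 1
      exact pvLast_or _ _ _
    have hfold : pvSentenceMarkers.foldl (fun best marker =>
        let loc := PySem.Str.rfind window marker
        if loc > best then loc else best) (-1) = pvLast (pvSentP window.toList) window.toList.length := by
      show (if PySem.Str.rfind window "! " >
              (if PySem.Str.rfind window "? " >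
                  (if PySem.Str.rfind window ". " > -1 then PySem.Str.rfind window ". " else -1)
                then PySem.Str.rfind window "? "
                else (if PySem.Str.rfind window ". " > -1 then PySem.Str.rfind window ". " else -1))
            then PySem.Str.rfind window "! "
            else (if PySem.Str.rfind window "? " >
                  (if PySem.Str.rfind window ". " > -1 then PySem.Str.rfind window ". " else -1)
                then PySem.Str.rfind window "? "
                else (if PySem.Str.rfind window ". " > -1 then PySem.Str.rfind window ". " else -1))) = _
      rw [hdot, hq, hex, hsent]
      exact pvFold_max _ _ _ (pvLast_ge _ _) (pvLast_ge _ _) (pvLast_ge _ _)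
    simp only [hnl, hfold, hsp]
    norm_num

-- ===== VERDICT (by name: the statement is the Claim_ definition above) =====
theorem find_backward_split_py_spec : Claim_equal_find_backward_split_py := by
  intro text start target_end split_window _
  unfold Spec_find_backward_split_py find_backward_split_py find_backward_split_py_alt
  exact pvBody (PySem.Str.slice text (some (max start (target_end - split_window))) (some target_end)) (max start (target_end - split_window)) target_end
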